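-- pv_equiv track=rewrite | github.com/OldMateTys/Advent-2024 | 12/12th.py | doesLineExist
-- ===== SOURCE A (Python) =====
-- def doesLineExist(i, j, increment, side, board, visited, letter, vert):
--
--
--     if i < 0 or i >= len(board) or j < 0 or j >= len(board[0]):
--         return False
--     if board[i][j] != letter:
--         return False
--
--     match side:
--         case 0:
--             if i > 0:
--                 if board[i-1][j] != letter:
--                     if visited[i][j]:
--
--                         return True
--                 else:
--                     return False
--             else:
--                 if visited[i][j]:
--                     return True
--         case 1:
--             if j > 0:
--                 if board[i][j-1] != letter:
--                     if visited[i][j]: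
--                         return True
--                 else:
--                     return False
--             else:
--                 if visited[i][j]:
--                     return True
--         case 2:
--             if i < len(board) - 1:
--                 if board[i+1][j] != letter:
--                     if visited[i][j]:
--                         return True
--                 else:
--                     return False
--             else:
--
--                 if visited[i][j]:
--                     return True
--         case 3:
--
--             if j < len(board[0]) -1:
--                 if board[i][j + 1] != letter:
--
--                     if visited[i][j]:
--
--                         return True
--                 else:
--                     return False
--             else:
--                 if visited[i][j]:
--                     return True
--     if vert:
--         return doesLineExist(i + increment, j, increment, side, board, visited, letter, True)
--
--     return doesLineExist(i, j + increment, increment, side, board, visited, letter, False)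
-- ===== SOURCE B (Python) =====
-- def doesLineExist(i, j, increment, side, board, visited, letter, vert):
--     deltas = {0: (-1, 0), 1: (0, -1), 2: (1, 0), 3: (0, 1)}
--     while True:
--         if not (0 <= i < len(board)) or not (0 <= j < len(board[0])):
--             return False
--         if board[i][j] != letter:
--             return False
--         if side in deltas:
--             di, dj = deltas[side]
--             ni, nj = i + di, j + dj
--             if 0 <= ni < len(board) and 0 <= nj < len(board[0]) and board[ni][nj] == letter:
--                 return False
--             if visited[i][j]:
--                 return True
--         if vert:
--             i += increment
--         else:
--             j += increment
-- ===== Notes on version B (the rewrite author's own statement) =====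
-- stated objective: simpler
-- what changed: Replaced the recursion and the four copy-pasted match-case branches by a single while-loop with a delta table and one unified neighbour-in-bounds-and-same-letter test.
-- outside the precondition, e.g. on doesLineExist(0, 0, 0, 0, [['a']], [[True]], 'a', True): A returns True, B returns True
import Mathlib
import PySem

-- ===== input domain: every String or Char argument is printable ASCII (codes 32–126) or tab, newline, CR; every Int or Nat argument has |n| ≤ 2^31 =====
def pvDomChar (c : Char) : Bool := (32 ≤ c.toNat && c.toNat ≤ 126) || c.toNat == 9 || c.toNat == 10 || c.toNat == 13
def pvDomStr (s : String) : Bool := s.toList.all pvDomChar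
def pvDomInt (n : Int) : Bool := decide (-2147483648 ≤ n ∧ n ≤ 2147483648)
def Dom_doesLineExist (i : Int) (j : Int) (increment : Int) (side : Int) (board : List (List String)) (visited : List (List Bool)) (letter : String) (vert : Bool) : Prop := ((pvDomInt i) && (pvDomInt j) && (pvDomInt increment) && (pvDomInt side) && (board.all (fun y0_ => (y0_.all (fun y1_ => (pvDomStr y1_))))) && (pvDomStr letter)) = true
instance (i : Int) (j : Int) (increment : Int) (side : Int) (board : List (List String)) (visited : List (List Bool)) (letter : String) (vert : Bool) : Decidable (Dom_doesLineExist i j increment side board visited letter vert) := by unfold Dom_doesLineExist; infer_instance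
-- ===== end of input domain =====

-- B replaces A's four near-identical copy-pasted `match side` branches and its tail recursion by a
-- single delta table plus one unified neighbour test inside a plain `while True` walk (simpler).
-- On inputs admitted by Pre_ both versions return the same value; the equivalence below is proved
-- for ALL inputs of the fuel-indexed ports.

-- shared cell accessors (both Pythons index in-bounds only under Pre_)
def pvCell (board : List (List String)) (i j : Int) : String :=
  (board.getD i.toNat []).getD j.toNat ""
def pvVis (visited : List (List Bool)) (i j : Int) : Bool :=
  (visited.getD i.toNat []).getD j.toNat false

-- ===== PORT A =====
-- A's recursion: the fuel only bounds the recursion depth; under Pre_ (increment ≠ 0) the walk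
-- leaves the board after at most board.length / row-length steps, so the fuel is never exhausted.
def doesLineExistGo (fuel : Nat) (i : Int) (j : Int) (increment : Int) (side : Int) (board : List (List String)) (visited : List (List Bool)) (letter : String) (vert : Bool) : Bool :=
  match fuel with
  | 0 => false
  | Nat.succ f =>
    if i < 0 ∨ i ≥ (board.length : Int) ∨ j < 0 ∨ j ≥ ((board.headD []).length : Int) then false
    else if pvCell board i j ≠ letter then false
    else
      -- fall-through of the match block = the recursive call at the bottom of A
      let rest :=
        if vert then doesLineExistGo f (i + increment) j increment side board visited letter true
        else doesLineExistGo f i (j + increment) increment side board visited letter false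
      if side = 0 then
        if 0 < i then
          if pvCell board (i-1) j ≠ letter then (if pvVis visited i j then true else rest)
          else false
        else if pvVis visited i j then true else rest
      else if side = 1 then
        if 0 < j then
          if pvCell board i (j-1) ≠ letter then (if pvVis visited i j then true else rest)
          else false
        else if pvVis visited i j then true else rest
      else if side = 2 then
        if i < (board.length : Int) - 1 then
          if pvCell board (i+1) j ≠ letter then (if pvVis visited i j then true else rest)
          else false
        else if pvVis visited i j then true else rest
      else if side = 3 then
        if j < ((board.headD []).length : Int) - 1 then
          if pvCell board i (j+1) ≠ letter then (if pvVis visited i j then true else rest)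
          else false
        else if pvVis visited i j then true else rest
      else rest

def doesLineExist (i : Int) (j : Int) (increment : Int) (side : Int) (board : List (List String)) (visited : List (List Bool)) (letter : String) (vert : Bool) : Bool :=
  doesLineExistGo (board.length + (board.headD []).length + 2) i j increment side board visited letter vert

-- ===== PORT B =====
-- B's delta table {0:(-1,0), 1:(0,-1), 2:(1,0), 3:(0,1)}, as its two components
def pvDeltaI (side : Int) : Int :=
  if side = 0 then -1 else if side = 1 then 0 else if side = 2 then 1 else 0
def pvDeltaJ (side : Int) : Int :=
  if side = 0 then 0 else if side = 1 then -1 else if side = 2 then 0 else 1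

-- one iteration of B's `while True` body: `some b` = return b, `none` = fall through and step
def doesLineExistStep (i : Int) (j : Int) (side : Int) (board : List (List String)) (visited : List (List Bool)) (letter : String) : Option Bool :=
  if ¬(0 ≤ i ∧ i < (board.length : Int)) ∨ ¬(0 ≤ j ∧ j < ((board.headD []).length : Int)) then
    some false
  else if pvCell board i j ≠ letter then some false
  else if side = 0 ∨ side = 1 ∨ side = 2 ∨ side = 3 then
    let ni := i + pvDeltaI side
    let nj := j + pvDeltaJ side
    if (0 ≤ ni ∧ ni < (board.length : Int)) ∧ (0 ≤ nj ∧ nj < ((board.headD []).length : Int)) ∧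
        pvCell board ni nj = letter then some false
    else if pvVis visited i j then some true else none
  else none

def doesLineExistLoop (fuel : Nat) (i : Int) (j : Int) (increment : Int) (side : Int) (board : List (List String)) (visited : List (List Bool)) (letter : String) (vert : Bool) : Bool :=
  match fuel with
  | 0 => false
  | Nat.succ f =>
    match doesLineExistStep i j side board visited letter with
    | some b => b
    | none =>
      if vert then doesLineExistLoop f (i + increment) j increment side board visited letter vert
      else doesLineExistLoop f i (j + increment) increment side board visited letter vert

def doesLineExist_alt (i : Int) (j : Int) (increment : Int) (side : Int) (board : List (List String)) (visited : List (List Bool)) (letter : String) (vert : Bool) : Bool :=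
  doesLineExistLoop (board.length + (board.headD []).length + 2) i j increment side board visited letter vert

-- ===== PRECONDITION & SPEC =====
-- Pre_ admits every input on which A's walk provably stops safely: a start outside the bounds or on
-- a non-matching cell (A returns False at once), or a rectangular board with a visited grid of the
-- same shape and increment ≠ 0 (the walk leaves the board). It excludes increment = 0 and
-- mismatched-shape grids, where A's deeper walks hit RecursionError / IndexError; on such inputs
-- where the walk happens to stop before the bad access, A and B still return the same value.
def Pre_doesLineExist (i : Int) (j : Int) (increment : Int) (side : Int) (board : List (List String)) (visited : List (List Bool)) (letter : String) (vert : Bool) : Prop :=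
  (¬(0 ≤ i ∧ i < (board.length : Int) ∧ 0 ≤ j ∧ j < ((board.headD []).length : Int))) ∨
  (0 ≤ i ∧ i < (board.length : Int) ∧ 0 ≤ j ∧ j < ((board.headD []).length : Int) ∧
    j < ((board.getD i.toNat []).length : Int) ∧ pvCell board i j ≠ letter) ∨
  (increment ≠ 0 ∧
    (∀ row ∈ board, row.length = (board.headD []).length) ∧
    visited.length = board.length ∧
    (∀ row ∈ visited, row.length = (board.headD []).length))
instance (i : Int) (j : Int) (increment : Int) (side : Int) (board : List (List String)) (visited : List (List Bool)) (letter : String) (vert : Bool) : Decidable (Pre_doesLineExist i j increment side board visited letter vert) := by unfold Pre_doesLineExist; infer_instance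

def pvWitness_doesLineExist : Int × Int × Int × Int × List (List String) × List (List Bool) × String × Bool :=
  (0, 0, 1, 0, [["a", "b"], ["a", "a"]], [[true, false], [false, true]], "a", true)

def Spec_doesLineExist (i : Int) (j : Int) (increment : Int) (side : Int) (board : List (List String)) (visited : List (List Bool)) (letter : String) (vert : Bool) (out : Bool) : Prop := out = doesLineExist_alt i j increment side board visited letter vert
instance (i : Int) (j : Int) (increment : Int) (side : Int) (board : List (List String)) (visited : List (List Bool)) (letter : String) (vert : Bool) (out : Bool) : Decidable (Spec_doesLineExist i j increment side board visited letter vert out) := by unfold Spec_doesLineExist; infer_instance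

-- ===== CLAIM (what is proved, stated in full; the proofs are below) =====
def Claim_equal_doesLineExist : Prop := ∀ (i : Int) (j : Int) (increment : Int) (side : Int) (board : List (List String)) (visited : List (List Bool)) (letter : String) (vert : Bool), Dom_doesLineExist i j increment side board visited letter vert → Pre_doesLineExist i j increment side board visited letter vert → Spec_doesLineExist i j increment side board visited letter vert (doesLineExist i j increment side board visited letter vert)

-- ===== LEMMAS AND PROOFS =====

-- one unfolding of A's recursion equals one iteration of B's loop body (all inputs)
theorem go_step (f : Nat) (i j increment side : Int) (board : List (List String)) (visited : List (List Bool)) (letter : String) (vert : Bool) :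
    doesLineExistGo (Nat.succ f) i j increment side board visited letter vert =
      (match doesLineExistStep i j side board visited letter with
       | some b => b
       | none =>
         if vert then doesLineExistGo f (i + increment) j increment side board visited letter true
         else doesLineExistGo f i (j + increment) increment side board visited letter false) := by
  simp only [doesLineExistGo]
  by_cases hB : 0 ≤ i ∧ i < (board.length : Int) ∧ 0 ≤ j ∧ j < ((board.headD []).length : Int)
  case neg =>
    rw [if_pos (by by_contra h; push_neg at h; exact hB ⟨by omega, by omega, by omega, by omega⟩)]
    rw [doesLineExistStep,
      if_pos (show ¬_ ∨ ¬_ by by_contra h; push_neg at h; exact hB ⟨h.1.1, h.1.2, h.2.1, h.2.2⟩)]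
  case pos =>
    rw [if_neg (by push_neg; omega)]
    have hBB : ¬(¬(0 ≤ i ∧ i < (board.length : Int)) ∨ ¬(0 ≤ j ∧ j < ((board.headD []).length : Int))) := by
      push_neg; exact ⟨⟨hB.1, hB.2.1⟩, ⟨hB.2.2.1, hB.2.2.2⟩⟩
    by_cases hc : pvCell board i j ≠ letter
    · rw [if_pos hc, doesLineExistStep, if_neg hBB, if_pos hc]
    · rw [if_neg hc]
      by_cases h0 : side = 0
      · subst h0
        have dI : pvDeltaI 0 = (-1 : Int) := by norm_num [pvDeltaI]
        have dJ : pvDeltaJ 0 = (0 : Int) := by norm_num [pvDeltaJ]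
        simp only [doesLineExistStep, dI, dJ, reduceIte, true_or, or_true, if_true]
        rw [if_neg hBB, if_neg hc]
        rw [show (i + -1 : Int) = i - 1 from by ring]
        rw [show (j + 0 : Int) = j from by ring]
        by_cases hin : 0 < i
        · rw [if_pos hin]
          by_cases hn : pvCell board (i - 1) j = letter
          · rw [if_neg (by simp [hn]), if_pos (show _ ∧ _ ∧ _ from ⟨⟨by omega, by omega⟩, ⟨by omega, by omega⟩, hn⟩)]
          · rw [if_pos (by simpa using hn), if_neg (show ¬(_ ∧ _ ∧ _) from by rintro ⟨-, -, h⟩; exact hn h)]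
            by_cases hv : pvVis visited i j = true <;> simp [hv]
        · rw [if_neg hin, if_neg (show ¬(_ ∧ _ ∧ _) from by rintro ⟨⟨u1, u2⟩, ⟨u3, u4⟩, -⟩; omega)]
          by_cases hv : pvVis visited i j = true <;> simp [hv]
      ·
        by_cases h1 : side = 1
        · subst h1
          have dI : pvDeltaI 1 = (0 : Int) := by norm_num [pvDeltaI]
          have dJ : pvDeltaJ 1 = (-1 : Int) := by norm_num [pvDeltaJ]
          simp only [doesLineExistStep, dI, dJ, reduceIte, true_or, or_true, if_true]
          rw [if_neg (by norm_num), if_neg hBB, if_neg hc]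
          rw [show (i + 0 : Int) = i from by ring]
          rw [show (j + -1 : Int) = j - 1 from by ring]
          by_cases hin : 0 < j
          · rw [if_pos hin]
            by_cases hn : pvCell board i (j - 1) = letter
            · rw [if_neg (by simp [hn]), if_pos (show _ ∧ _ ∧ _ from ⟨⟨by omega, by omega⟩, ⟨by omega, by omega⟩, hn⟩)]
            · rw [if_pos (by simpa using hn), if_neg (show ¬(_ ∧ _ ∧ _) from by rintro ⟨-, -, h⟩; exact hn h)]
              by_cases hv : pvVis visited i j = true <;> simp [hv]
          · rw [if_neg hin, if_neg (show ¬(_ ∧ _ ∧ _) from by rintro ⟨⟨u1, u2⟩, ⟨u3, u4⟩, -⟩; omega)]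
            by_cases hv : pvVis visited i j = true <;> simp [hv]
        ·
          by_cases h2 : side = 2
          · subst h2
            have dI : pvDeltaI 2 = (1 : Int) := by norm_num [pvDeltaI]
            have dJ : pvDeltaJ 2 = (0 : Int) := by norm_num [pvDeltaJ]
            simp only [doesLineExistStep, dI, dJ, reduceIte, true_or, or_true, if_true]
            rw [if_neg (by norm_num), if_neg (by norm_num), if_neg hBB, if_neg hc]
            rw [show (j + 0 : Int) = j from by ring]
            by_cases hin : i < (board.length : Int) - 1
            · rw [if_pos hin]
              by_cases hn : pvCell board (i + 1) j = letter
              · rw [if_neg (by simp [hn]), if_pos (show _ ∧ _ ∧ _ from ⟨⟨by omega, by omega⟩, ⟨by omega, by omega⟩, hn⟩)]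
              · rw [if_pos (by simpa using hn), if_neg (show ¬(_ ∧ _ ∧ _) from by rintro ⟨-, -, h⟩; exact hn h)]
                by_cases hv : pvVis visited i j = true <;> simp [hv]
            · rw [if_neg hin, if_neg (show ¬(_ ∧ _ ∧ _) from by rintro ⟨⟨u1, u2⟩, ⟨u3, u4⟩, -⟩; omega)]
              by_cases hv : pvVis visited i j = true <;> simp [hv]
          ·
            by_cases h3 : side = 3
            · subst h3
              have dI : pvDeltaI 3 = (0 : Int) := by norm_num [pvDeltaI]
              have dJ : pvDeltaJ 3 = (1 : Int) := by norm_num [pvDeltaJ]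
              simp only [doesLineExistStep, dI, dJ, reduceIte, true_or, or_true, if_true]
              rw [if_neg (by norm_num), if_neg (by norm_num), if_neg (by norm_num), if_neg hBB, if_neg hc]
              rw [show (i + 0 : Int) = i from by ring]
              by_cases hin : j < ((board.headD []).length : Int) - 1
              · rw [if_pos hin]
                by_cases hn : pvCell board i (j + 1) = letter
                · rw [if_neg (by simp [hn]), if_pos (show _ ∧ _ ∧ _ from ⟨⟨by omega, by omega⟩, ⟨by omega, by omega⟩, hn⟩)]
                · rw [if_pos (by simpa using hn), if_neg (show ¬(_ ∧ _ ∧ _) from by rintro ⟨-, -, h⟩; exact hn h)]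
                  by_cases hv : pvVis visited i j = true <;> simp [hv]
              · rw [if_neg hin, if_neg (show ¬(_ ∧ _ ∧ _) from by rintro ⟨⟨u1, u2⟩, ⟨u3, u4⟩, -⟩; omega)]
                by_cases hv : pvVis visited i j = true <;> simp [hv]
            · simp only [doesLineExistStep]
              rw [if_neg hBB, if_neg hc, if_neg (show ¬(_ ∨ _) from by push_neg; exact ⟨h0, h1, h2, h3⟩)]
              rw [if_neg h0, if_neg h1, if_neg h2, if_neg h3]

-- fuel-indexed A equals fuel-indexed B, on ALL inputs
theorem go_eq_loop (fuel : Nat) (i j increment side : Int) (board : List (List String)) (visited : List (List Bool)) (letter : String) (vert : Bool) :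
    doesLineExistGo fuel i j increment side board visited letter vert =
    doesLineExistLoop fuel i j increment side board visited letter vert := by
  induction fuel generalizing i j vert with
  | zero => rfl
  | succ f ih =>
    rw [go_step]
    simp only [doesLineExistLoop]
    cases doesLineExistStep i j side board visited letter with
    | some b => rfl
    | none => cases vert <;> simp [ih]

-- ===== VERDICT (by name: the statement is the Claim_ definition above) =====
theorem doesLineExist_spec : Claim_equal_doesLineExist := by
  intro i j increment side board visited letter vert _ _
  unfold Spec_doesLineExist doesLineExist doesLineExist_alt
  exact go_eq_loop _ i j increment side board visited letter vert
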